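-- pv_equiv track=rewrite | github.com/opnsense/plugins | net/rtsphelper/src/opnsense/scripts/net/rtsphelper/rtsphelper.py | allowedPortForward
-- ===== SOURCE A (Python) =====
-- def ip_to_u32(ip):
--     return int(''.join('%02x' % int(d) for d in ip.split('.')), 16)
--
-- def allowedIP(ipstr, perms):
--     ip = ip_to_u32(ipstr)
--     for perm in perms:
--         mask, net = perm[0]
--         if ip & mask == net:
--             return True
--     return False
--
-- def allowedPortForward(ipstr, port, perms):
--     if not allowedIP(ipstr, perms):
--         return False
--     else:
--         ip = ip_to_u32(ipstr)
--         for perm in perms: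
--             mask, net = perm[0]
--             ports = perm[1]
--             if ip & mask == net:
--                 if int(port) >= int(ports[0]) and int(port) <= int(ports[1]):
--                     return True
--         return False
-- ===== SOURCE B (Python) =====
-- def ip_to_u32(ip):
--     return int(''.join('%02x' % int(d) for d in ip.split('.')), 16)
--
-- def allowedPortForward(ipstr, port, perms):
--     ip = ip_to_u32(ipstr)
--     for (mask, net), ports in perms:
--         if ip & mask == net and int(ports[0]) <= int(port) <= int(ports[1]):
--             return True
--     return False
-- ===== Notes on version B (the rewrite author's own statement) =====
-- stated objective: simpler
-- what changed: B parses the IP once and makes a single fused pass over perms checking mask-match and port-range together, instead of A's separate allowedIP existence scan followed by a second scan (with the IP re-parsed).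
import Mathlib
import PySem

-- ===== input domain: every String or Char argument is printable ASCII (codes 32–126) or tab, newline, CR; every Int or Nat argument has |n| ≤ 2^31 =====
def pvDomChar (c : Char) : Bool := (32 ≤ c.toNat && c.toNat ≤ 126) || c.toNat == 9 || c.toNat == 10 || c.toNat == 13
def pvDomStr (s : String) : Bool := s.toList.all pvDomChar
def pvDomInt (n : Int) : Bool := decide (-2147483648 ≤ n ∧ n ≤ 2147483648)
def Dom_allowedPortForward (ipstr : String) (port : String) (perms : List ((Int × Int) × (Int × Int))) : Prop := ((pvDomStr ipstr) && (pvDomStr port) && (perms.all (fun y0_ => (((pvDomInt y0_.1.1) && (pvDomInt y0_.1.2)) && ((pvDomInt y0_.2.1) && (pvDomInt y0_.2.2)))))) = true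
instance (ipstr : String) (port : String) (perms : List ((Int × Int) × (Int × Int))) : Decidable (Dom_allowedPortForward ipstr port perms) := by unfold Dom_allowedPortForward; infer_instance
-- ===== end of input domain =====

-- B replaces A's two sequential scans of perms (allowedIP existence scan, then a second
-- mask-match + port-range scan) by a single fused loop; objective: simpler (one pass).

-- ===== PORT A =====
-- shared helper: Python's ip_to_u32 (same module helper, used verbatim by both A and B).
-- '%02x' % n : lowercase hex of |n| with '-' in front for n < 0, zero-padded (after the sign)
-- to width 2 — exactly Python's zfill to width 2 of the sign+digits string.
def pvHex2 (n : Int) : List Char :=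
  PySem.Chars.zfill (if n < 0 then '-' :: Nat.toDigits 16 (-n).toNat else Nat.toDigits 16 n.toNat) 2

-- ''.join('%02x' % int(d) for d in parts): none at the first int(d) ValueError
def pvJoinHex? : List String → Option (List Char)
  | [] => some []
  | d :: rest =>
    match PySem.Int.ofStr? d with
    | none => none
    | some n =>
      match pvJoinHex? rest with
      | none => none
      | some cs => some (pvHex2 n ++ cs)

-- ip_to_u32(ip); none where Python raises ValueError (bad segment, or int(join, 16) fails,
-- e.g. a '-' from a negative non-first segment inside the joined string)
def ipToU32? (ip : String) : Option Int :=
  match pvJoinHex? ((PySem.Str.split? ip ".").getD []) with   -- sep "." ≠ "" so split? is always some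
  | none => none
  | some cs => PySem.Int.ofCharsBase? cs 16

def pvLoopIP (ip : Int) : List ((Int × Int) × (Int × Int)) → Bool
  | [] => false
  | ((mask, net), _) :: rest => if PySem.Int.band ip mask == net then true else pvLoopIP ip rest

def allowedIP (ipstr : String) (perms : List ((Int × Int) × (Int × Int))) : Bool :=
  match ipToU32? ipstr with
  | none => false            -- Python raised ValueError here; excluded by Pre_
  | some ip => pvLoopIP ip perms

def pvLoopA (ip : Int) (port : String) : List ((Int × Int) × (Int × Int)) → Bool
  | [] => false
  | ((mask, net), (p0, p1)) :: rest =>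
    if PySem.Int.band ip mask == net then
      match PySem.Int.ofStr? port with
      | none => false        -- int(port) raised ValueError in Python; excluded by Pre_
      | some p => if p0 ≤ p && p ≤ p1 then true else pvLoopA ip port rest
    else pvLoopA ip port rest

def allowedPortForward (ipstr : String) (port : String) (perms : List ((Int × Int) × (Int × Int))) : Bool :=
  if !(allowedIP ipstr perms) then false
  else
    match ipToU32? ipstr with
    | none => false          -- unreachable: allowedIP was true
    | some ip => pvLoopA ip port perms

-- ===== PORT B =====
def pvLoopB (ip : Int) (port : String) : List ((Int × Int) × (Int × Int)) → Bool
  | [] => false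
  | ((mask, net), (lo, hi)) :: rest =>
    if PySem.Int.band ip mask == net &&
       (match PySem.Int.ofStr? port with    -- int(port), evaluated only when the mask matched
        | none => false                     -- int(port) raised ValueError in Python; excluded by Pre_
        | some p => decide (lo ≤ p) && decide (p ≤ hi))
    then true else pvLoopB ip port rest

def allowedPortForward_alt (ipstr : String) (port : String) (perms : List ((Int × Int) × (Int × Int))) : Bool :=
  match ipToU32? ipstr with
  | none => false            -- Python raised ValueError here; excluded by Pre_
  | some ip => pvLoopB ip port perms

-- ===== PRECONDITION & SPEC =====
-- Pre_ = exactly the inputs on which the Python A returns normally: every '.'-segment of ipstr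
-- parses as int (else ValueError), no segment after the first is negative (its '-' would make
-- int(join, 16) raise ValueError), and if some perm's mask matches the ip, port parses as int
-- (else ValueError). Stated over the split segments; pvPreIp is the ip those segments denote.
def pvPreIp (ipstr : String) : Int :=
  (PySem.Int.ofCharsBase?
    (((PySem.Str.split? ipstr ".").getD []).flatMap (fun d => pvHex2 ((PySem.Int.ofStr? d).getD 0))) 16).getD 0
def Pre_allowedPortForward (ipstr : String) (port : String) (perms : List ((Int × Int) × (Int × Int))) : Prop :=
  (∀ d ∈ (PySem.Str.split? ipstr ".").getD [], (PySem.Int.ofStr? d).isSome = true) ∧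
  (∀ d ∈ ((PySem.Str.split? ipstr ".").getD []).tail, 0 ≤ (PySem.Int.ofStr? d).getD 0) ∧
  ((∃ pm ∈ perms, PySem.Int.band (pvPreIp ipstr) pm.1.1 = pm.1.2) →
    (PySem.Int.ofStr? port).isSome = true)
instance (ipstr : String) (port : String) (perms : List ((Int × Int) × (Int × Int))) : Decidable (Pre_allowedPortForward ipstr port perms) := by unfold Pre_allowedPortForward; infer_instance

def pvWitness_allowedPortForward : String × String × (List ((Int × Int) × (Int × Int))) :=
  ("1.2.3.4", "80", [((255, 4), (1, 100))])

def Spec_allowedPortForward (ipstr : String) (port : String) (perms : List ((Int × Int) × (Int × Int))) (out : Bool) : Prop := out = allowedPortForward_alt ipstr port perms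
instance (ipstr : String) (port : String) (perms : List ((Int × Int) × (Int × Int))) (out : Bool) : Decidable (Spec_allowedPortForward ipstr port perms out) := by unfold Spec_allowedPortForward; infer_instance

-- ===== CLAIM (what is proved, stated in full; the proofs are below) =====
def Claim_equal_allowedPortForward : Prop := ∀ (ipstr : String) (port : String) (perms : List ((Int × Int) × (Int × Int))), Dom_allowedPortForward ipstr port perms → Pre_allowedPortForward ipstr port perms → Spec_allowedPortForward ipstr port perms (allowedPortForward ipstr port perms)

-- ===== LEMMAS AND PROOFS =====

-- if port does not parse, B's fused condition is false at every element
lemma pvLoopB_of_port_none (ip : Int) (port : String) (h : PySem.Int.ofStr? port = none) :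
    ∀ perms, pvLoopB ip port perms = false := by
  intro perms
  induction perms with
  | nil => rfl
  | cons pm rest ih =>
    obtain ⟨⟨mask, net⟩, lo, hi⟩ := pm
    simp [pvLoopB, h, ih]

-- A's second loop and B's fused loop agree on every input
lemma pvLoopA_eq_pvLoopB (ip : Int) (port : String) :
    ∀ perms, pvLoopA ip port perms = pvLoopB ip port perms := by
  intro perms
  induction perms with
  | nil => rfl
  | cons pm rest ih =>
    obtain ⟨⟨mask, net⟩, lo, hi⟩ := pm
    by_cases hm : PySem.Int.band ip mask = net
    · cases hp : PySem.Int.ofStr? port with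
      | none => simp [pvLoopA, pvLoopB, hm, hp, pvLoopB_of_port_none ip port hp rest]
      | some p =>
        by_cases h1 : lo ≤ p
        · by_cases h2 : p ≤ hi
          · simp [pvLoopA, pvLoopB, hm, hp, h1, h2]
          · simp [pvLoopA, pvLoopB, hm, hp, h1, h2, ih]
        · simp [pvLoopA, pvLoopB, hm, hp, h1, ih]
    · simp [pvLoopA, pvLoopB, hm, ih]

-- if no perm's mask matches (allowedIP's scan is false), B's fused loop is false too
lemma pvLoopB_of_loopIP_false (ip : Int) (port : String) :
    ∀ perms, pvLoopIP ip perms = false → pvLoopB ip port perms = false := by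
  intro perms
  induction perms with
  | nil => intro _; rfl
  | cons pm rest ih =>
    obtain ⟨⟨mask, net⟩, lo, hi⟩ := pm
    intro h
    by_cases hm : PySem.Int.band ip mask = net
    · simp [pvLoopIP, hm] at h
    · simp [pvLoopIP, hm] at h
      simp [pvLoopB, hm, ih h]

-- ===== VERDICT (by name: the statement is the Claim_ definition above) =====
theorem allowedPortForward_spec : Claim_equal_allowedPortForward := by
  intro ipstr port perms _ _
  unfold Spec_allowedPortForward allowedPortForward allowedPortForward_alt allowedIP
  cases hip : ipToU32? ipstr with
  | none => simp
  | some ip =>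
    cases hIP : pvLoopIP ip perms with
    | false => simp [hIP, pvLoopB_of_loopIP_false ip port perms hIP]
    | true => simp [hIP, pvLoopA_eq_pvLoopB]
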